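-- pv_equiv track=rewrite | github.com/ryandeathridge/Agent1 | scp-cleaning-functions/classify_categories/__init__.py | _build_keyword_map
-- ===== SOURCE A (Python) =====
-- def _build_keyword_map(taxonomy: dict) -> dict:
--     """Build a map of keywords to categories."""
--     keyword_map = {}
--
--     for l1, l2_dict in taxonomy.items():
--         for l2, l3_list in l2_dict.items():
--             for l3 in l3_list:
--                 keywords = l3.lower().split()
--                 for keyword in keywords:
--                     if len(keyword) > 3:
--                         if keyword not in keyword_map:
--                             keyword_map[keyword] = []
--                         keyword_map[keyword].append({'l1': l1, 'l2': l2, 'l3': l3})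
--
--     return keyword_map
-- ===== SOURCE B (Python) =====
-- def _build_keyword_map(taxonomy: dict) -> dict:
--     """Build a map of keywords to categories: flatten to (keyword, record)
--     occurrences, then group by per-keyword scans over that flat list
--     (no incremental dict mutation)."""
--     pairs = [(w, {'l1': l1, 'l2': l2, 'l3': l3})
--              for l1, l2_dict in taxonomy.items()
--              for l2, l3_list in l2_dict.items()
--              for l3 in l3_list
--              for w in l3.lower().split()
--              if len(w) > 3]
--     keys = list(dict.fromkeys(w for w, _ in pairs))
--     return {k: [r for w, r in pairs if w == k] for k in keys}
-- ===== Notes on version B (the rewrite author's own statement) =====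
-- stated objective: alternative
-- what changed: Replaces A's incremental dict mutation inside four nested loops (membership check, create-empty, append) by a flatten-then-scan scheme: materialise the flat list of (keyword, record) occurrences, dedup its keywords in first-occurrence order, and build each entry by a per-keyword scan of the flat list.
import Mathlib
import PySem

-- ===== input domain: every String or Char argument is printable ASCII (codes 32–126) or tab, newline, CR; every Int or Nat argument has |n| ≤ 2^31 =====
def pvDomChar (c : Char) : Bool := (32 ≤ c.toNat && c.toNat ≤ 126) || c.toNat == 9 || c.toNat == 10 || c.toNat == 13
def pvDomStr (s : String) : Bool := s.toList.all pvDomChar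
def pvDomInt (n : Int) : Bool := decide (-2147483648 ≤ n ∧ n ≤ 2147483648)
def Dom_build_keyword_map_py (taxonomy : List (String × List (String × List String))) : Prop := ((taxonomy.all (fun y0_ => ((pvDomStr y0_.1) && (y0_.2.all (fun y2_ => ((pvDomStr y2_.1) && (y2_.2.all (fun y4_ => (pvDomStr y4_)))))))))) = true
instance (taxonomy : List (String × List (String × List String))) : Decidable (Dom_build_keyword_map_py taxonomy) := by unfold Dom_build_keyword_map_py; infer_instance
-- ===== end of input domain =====

-- B replaces A's incremental dict building (four nested loops, membership check,
-- create-empty, append) by a flat occurrence list, an ordered dedup of its keywords,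
-- and a per-keyword scan of the occurrence list; alternative decomposition, same result.

-- ===== PORT A =====
-- literal transliteration of A's nested loops: membership check, create-empty, append
def build_keyword_map_py (taxonomy : List (String × List (String × List String))) : List (String × List (List (String × String))) :=
  (taxonomy.foldl (fun m p =>
    p.2.foldl (fun m q =>
      q.2.foldl (fun m l3 =>
        (PySem.Str.split₀ (PySem.Str.lower l3)).foldl (fun m kw =>
          if 3 < PySem.Str.len kw then
            let m1 := if m.contains kw then m else m.insert kw ([] : List (List (String × String)))
            m1.modify kw [] (fun l => l ++ [[("l1", p.1), ("l2", q.1), ("l3", l3)]])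
          else m) m) m) m)
    PySem.Dict.empty).items

-- ===== PORT B =====
-- Source B's 'pairs': the flat ordered list of (keyword, record) occurrences
def pvPairs (taxonomy : List (String × List (String × List String))) : List (String × List (String × String)) :=
  taxonomy.flatMap (fun p =>
    p.2.flatMap (fun q =>
      q.2.flatMap (fun l3 =>
        ((PySem.Str.split₀ (PySem.Str.lower l3)).filter (fun kw => 3 < PySem.Str.len kw)).map
          (fun kw => (kw, [("l1", p.1), ("l2", q.1), ("l3", l3)])))))

-- Source B: keys = list(dict.fromkeys(w for w,_ in pairs)); {k: [r for w,r in pairs if w==k] for k in keys}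
def build_keyword_map_py_alt (taxonomy : List (String × List (String × List String))) : List (String × List (List (String × String))) :=
  let pairs := pvPairs taxonomy
  (PySem.List.dedup (pairs.map Prod.fst)).map
    (fun k => (k, (pairs.filter (fun wr => wr.1 == k)).map Prod.snd))

-- ===== PRECONDITION & SPEC =====
def Spec_build_keyword_map_py (taxonomy : List (String × List (String × List String))) (out : List (String × List (List (String × String)))) : Prop := out = build_keyword_map_py_alt taxonomy
instance (taxonomy : List (String × List (String × List String))) (out : List (String × List (List (String × String)))) : Decidable (Spec_build_keyword_map_py taxonomy out) := by unfold Spec_build_keyword_map_py; infer_instance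

-- ===== CLAIM (what is proved, stated in full; the proofs are below) =====
def Claim_equal_build_keyword_map_py : Prop := ∀ (taxonomy : List (String × List (String × List String))), Dom_build_keyword_map_py taxonomy → Spec_build_keyword_map_py taxonomy (build_keyword_map_py taxonomy)

-- ===== LEMMAS AND PROOFS =====

-- A's "create empty then append" step equals a one-shot modify step
theorem pv_step_eq {κ ν : Type} [BEq κ] [LawfulBEq κ] (m : PySem.Dict κ ν) (k : κ)
    (dflt : ν) (f : ν → ν) :
    (if m.contains k then m else m.insert k dflt).modify k dflt f = m.modify k dflt f := by
  by_cases h : m.contains k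
  · simp [h]
  · simp only [h, Bool.false_eq_true, if_false]
    simp only [PySem.Dict.modify]
    apply PySem.Dict.ext
    rw [PySem.Dict.getD_insert_self]
    have hget : m.get? k = none := (PySem.Dict.get?_eq_none_iff_contains m k).mpr (by simp [h])
    have hgetD : m.getD k dflt = dflt := by
      simp [PySem.Dict.getD, hget]
    rw [hgetD]
    rw [PySem.Dict.items_insert_of_contains _ _ (PySem.Dict.contains_insert_self m k dflt),
        PySem.Dict.items_insert_of_not_contains _ _ (by simp [h]),
        PySem.Dict.items_insert_of_not_contains _ _ (by simp [h])]
    rw [List.map_append]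
    congr 1
    · have hid : ∀ p ∈ m.items, (if (p.1 == k) = true then (k, f dflt) else p) = id p := by
        intro p hp
        have hne : (p.1 == k) = false := by
          by_contra hbk
          have : m.contains k = true := by
            simp only [PySem.Dict.contains]
            exact List.any_eq_true.mpr ⟨p, hp, by simpa using hbk⟩
          simp [this] at h
        simp [hne]
      rw [List.map_congr_left hid, List.map_id]
    · simp

-- A equals the grouping foldl over the flat occurrence list
theorem pv_A_eq_foldl (taxonomy : List (String × List (String × List String))) :
    build_keyword_map_py taxonomy =
      ((pvPairs taxonomy).foldl
        (fun m wr => m.modify wr.1 [] (fun l => l ++ [wr.2])) PySem.Dict.empty).items := by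
  unfold build_keyword_map_py pvPairs
  congr 1
  rw [List.foldl_flatMap]
  apply PySem.List.foldl_congr_mem
  intro m p _
  rw [List.foldl_flatMap]
  apply PySem.List.foldl_congr_mem
  intro m q _
  rw [List.foldl_flatMap]
  apply PySem.List.foldl_congr_mem
  intro m l3 _
  rw [List.foldl_map, PySem.List.foldl_ite_eq_foldl_filter]
  apply PySem.List.foldl_congr_mem
  intro m kw _
  dsimp only
  exact pv_step_eq m kw [] _

-- a dict with Nodup keys is its key list paired with its lookups
theorem pv_items_eq_map_keys {κ ν : Type} [BEq κ] [LawfulBEq κ]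
    (d : PySem.Dict κ ν) (h : d.keys.Nodup) (d0 : ν) :
    d.items = d.keys.map (fun k => (k, d.getD k d0)) := by
  have : d.keys.map (fun k => (k, d.getD k d0))
      = d.items.map (fun p => (p.1, d.getD p.1 d0)) := by
    simp only [PySem.Dict.keys, List.map_map]; rfl
  rw [this]
  conv_lhs => rw [← List.map_id d.items]
  apply List.map_congr_left
  intro p hp
  obtain ⟨k, v⟩ := p
  simp [PySem.Dict.getD_of_mem_items d hp h]

theorem build_keyword_map_py_spec' (taxonomy : List (String × List (String × List String))) :
    build_keyword_map_py taxonomy = build_keyword_map_py_alt taxonomy := by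
  rw [pv_A_eq_foldl]
  unfold build_keyword_map_py_alt
  set ps := pvPairs taxonomy with hps
  have hkeys : ((ps.foldl (fun m wr => m.modify wr.1 [] (fun l => l ++ [wr.2]))
      PySem.Dict.empty)).keys = PySem.List.dedup (ps.map Prod.fst) := by
    rw [PySem.Dict.keys_foldl_modify_key]
    simp [PySem.Dict.keys_empty, PySem.List.dedup_eq_ofList, PySem.Set.ofList_eq_foldl, PySem.Set.update]
  have hnodup : ((ps.foldl (fun m wr => m.modify wr.1 [] (fun l => l ++ [wr.2]))
      PySem.Dict.empty)).keys.Nodup := by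
    rw [hkeys]; exact PySem.List.nodup_dedup _
  rw [pv_items_eq_map_keys _ hnodup ([] : List (List (String × String))), hkeys]
  apply List.map_congr_left
  intro k _
  rw [PySem.Dict.getD_foldl_modify_append]
  simp [PySem.Dict.getD_empty]

-- ===== VERDICT (by name: the statement is the Claim_ definition above) =====
theorem build_keyword_map_py_spec : Claim_equal_build_keyword_map_py := by
  intro taxonomy _
  exact build_keyword_map_py_spec' taxonomy
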